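-- pv_equiv track=rewrite | github.com/pratikpatelx/AnswerBot | UsefulAnswerParagraphsSelection/build_entropy_set.py | split_into_paragraphs
-- ===== SOURCE A (Python) =====
-- def split_into_paragraphs(data):
--     data = data.split("<p>")
--     para = []
--     for i in range(len(data)):
--         if data[i] != '':
--             temp = data[i].split("</p>")
--             for j in range(len(temp)):
--                 if temp[j].strip() != '':
--                     para.append(temp[j])
--     return para
-- ===== SOURCE B (Python) =====
-- def split_into_paragraphs(data):
--     # Single left-to-right scan: cut the text on either tag ("<p>" or "</p>")
--     # in one pass, then keep the pieces with non-whitespace content.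
--     pieces = []
--     buf = []
--     i = 0
--     n = len(data)
--     while i < n:
--         if data.startswith("<p>", i):
--             pieces.append("".join(buf))
--             buf = []
--             i += 3
--         elif data.startswith("</p>", i):
--             pieces.append("".join(buf))
--             buf = []
--             i += 4
--         else:
--             buf.append(data[i])
--             i += 1
--     pieces.append("".join(buf))
--     return [p for p in pieces if p.strip() != ""]
-- ===== Notes on version B (the rewrite author's own statement) =====
-- stated objective: alternative
-- what changed: Replaces the nested two-level split (split on '<p>', then split each piece on '</p>' with an append loop and an outer empty-skip) by a single character-level scan that cuts the text at either tag in one pass, followed by one flat filter on non-whitespace content.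
import Mathlib
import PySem

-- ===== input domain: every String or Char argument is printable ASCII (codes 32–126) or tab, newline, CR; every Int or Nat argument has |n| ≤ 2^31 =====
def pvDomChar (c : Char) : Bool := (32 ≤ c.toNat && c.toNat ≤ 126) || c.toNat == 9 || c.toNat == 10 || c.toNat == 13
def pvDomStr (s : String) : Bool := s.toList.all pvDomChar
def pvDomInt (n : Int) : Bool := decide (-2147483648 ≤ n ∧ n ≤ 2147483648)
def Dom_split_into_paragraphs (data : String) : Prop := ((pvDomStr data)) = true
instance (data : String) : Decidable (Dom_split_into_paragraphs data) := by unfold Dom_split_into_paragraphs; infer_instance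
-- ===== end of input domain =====

-- B replaces A's nested two-level split by a single character scan cutting at both tags plus one flat filter (alternative decomposition, same cost).

-- ===== PORT A =====
-- A: data.split("<p>"), skip '' pieces, split each on "</p>", append the pieces whose strip is non-empty.
def split_into_paragraphs (data : String) : List String :=
  let pieces := (PySem.Chars.splitOn data.toList "<p>".toList).map String.ofList
  pieces.foldl (fun para piece =>
    if piece ≠ "" then
      ((PySem.Chars.splitOn piece.toList "</p>".toList).map String.ofList).foldl
        (fun para2 t => if PySem.Str.strip t ≠ "" then para2 ++ [t] else para2) para
    else para) []

-- ===== PORT B =====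
-- B's scanner: cut the character list at every "<p>" or "</p>", keeping a buffer of the current piece.
def pvSplitTags : List Char → List Char → List (List Char)
  | buf, '<' :: 'p' :: '>' :: rest => buf.reverse :: pvSplitTags [] rest
  | buf, '<' :: '/' :: 'p' :: '>' :: rest => buf.reverse :: pvSplitTags [] rest
  | buf, c :: rest => pvSplitTags (c :: buf) rest
  | buf, [] => [buf.reverse]

def split_into_paragraphs_alt (data : String) : List String :=
  let pieces := (pvSplitTags [] data.toList).map String.ofList
  pieces.filter (fun p => decide (PySem.Str.strip p ≠ ""))

-- ===== PRECONDITION & SPEC =====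
def Spec_split_into_paragraphs (data : String) (out : List String) : Prop := out = split_into_paragraphs_alt data
instance (data : String) (out : List String) : Decidable (Spec_split_into_paragraphs data out) := by unfold Spec_split_into_paragraphs; infer_instance

-- ===== CLAIM (what is proved, stated in full; the proofs are below) =====
def Claim_equal_split_into_paragraphs : Prop := ∀ (data : String), Dom_split_into_paragraphs data → Spec_split_into_paragraphs data (split_into_paragraphs data)

-- ===== LEMMAS AND PROOFS =====

def pvSep1 : List Char := ['<', 'p', '>']
def pvSep2 : List Char := ['<', '/', 'p', '>']

-- Clean (fuel-free) reference splitter equal to PySem.Chars.splitOn for a non-empty separator.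
def pvCleanSplit (sep : List Char) (l : List Char) : List (List Char) :=
  if hs : sep = [] then [l]
  else
    match l with
    | [] => [[]]
    | c :: rest =>
      if sep.isPrefixOf (c :: rest) then
        [] :: pvCleanSplit sep (List.drop sep.length (c :: rest))
      else
        match pvCleanSplit sep rest with
        | [] => [[c]]
        | p :: ps => (c :: p) :: ps
termination_by l.length
decreasing_by
  · simp only [List.length_drop, List.length_cons]
    have : 0 < sep.length := List.length_pos_of_ne_nil hs
    omega
  · simp

-- prepend pre onto the first piece
def pvMapHd (pre : List Char) : List (List Char) → List (List Char)
  | [] => [pre]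
  | p :: ps => (pre ++ p) :: ps

-- the flat two-tag split that A's nested split amounts to
def pvF (cs : List Char) : List (List Char) :=
  (pvCleanSplit pvSep1 cs).flatMap (pvCleanSplit pvSep2)

theorem pvCleanSplit_head (sep l : List Char) :
    ∃ p ps, pvCleanSplit sep l = p :: ps ∧ p <+: l := by
  fun_induction pvCleanSplit sep l with
  | case1 _ => exact ⟨_, [], rfl, List.prefix_refl _⟩
  | case2 _ => exact ⟨[], [], rfl, List.nil_prefix⟩
  | case3 _ c rest hp ih => exact ⟨[], _, rfl, List.nil_prefix⟩
  | case4 _ c rest hp hnil ih => exact ⟨[c], [], rfl, by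
      obtain ⟨p, ps, h, _⟩ := ih; rw [h] at hnil; cases hnil⟩
  | case5 _ c rest hp p ps h ih =>
      obtain ⟨p', ps', h', hpre⟩ := ih
      rw [h] at h'; cases h'
      exact ⟨c :: p, ps, rfl, List.cons_prefix_cons.mpr ⟨rfl, hpre⟩⟩

theorem pvGo_spec (sep : List Char) (hs : sep ≠ []) :
    ∀ (fuel : Nat) (l cur : List Char) (acc : List (List Char)), l.length < fuel →
      PySem.Chars.splitOn.go sep fuel l cur acc
        = acc.reverse ++ pvMapHd cur.reverse (pvCleanSplit sep l) := by
  intro fuel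
  induction fuel with
  | zero => intro l cur acc h; omega
  | succ fuel ih =>
    intro l cur acc h
    rw [PySem.Chars.splitOn.go.eq_def]
    match l with
    | [] =>
      simp [pvCleanSplit, hs, pvMapHd]
    | c :: rest =>
      simp only []
      by_cases hp : sep.isPrefixOf (c :: rest) = true
      · rw [if_pos hp]
        have hlen : (List.drop sep.length (c :: rest)).length < fuel := by
          simp only [List.length_drop, List.length_cons]
          have : 0 < sep.length := List.length_pos_of_ne_nil hs
          simp only [List.length_cons] at h; omega
        rw [ih _ [] _ hlen]
        have : pvCleanSplit sep (c :: rest)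
            = [] :: pvCleanSplit sep (List.drop sep.length (c :: rest)) := by
          rw [pvCleanSplit]; simp [hs, hp]
        rw [this]
        obtain ⟨p, ps, hcl, _⟩ := pvCleanSplit_head sep (List.drop sep.length (c :: rest))
        rw [hcl]
        simp [pvMapHd]
      · rw [if_neg hp]
        have hlen : rest.length < fuel := by simp only [List.length_cons] at h; omega
        rw [ih _ _ _ hlen]
        obtain ⟨p, ps, hcl, _⟩ := pvCleanSplit_head sep rest
        have : pvCleanSplit sep (c :: rest) = (c :: p) :: ps := by
          rw [pvCleanSplit]; simp only [hs, dite_eq_ite, hp, Bool.false_eq_true, if_false, hcl]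
        rw [this, hcl]
        simp [pvMapHd]

theorem pvSplitOn_eq (sep l : List Char) (hs : sep ≠ []) :
    PySem.Chars.splitOn l sep = pvCleanSplit sep l := by
  unfold PySem.Chars.splitOn
  rw [pvGo_spec sep hs _ _ _ _ (by omega)]
  obtain ⟨p, ps, hcl, _⟩ := pvCleanSplit_head sep l
  rw [hcl]; simp [pvMapHd]

theorem pvClean_cons (sep : List Char) (c : Char) (rest p : List Char)
    (ps : List (List Char)) (hs : sep ≠ []) (hp : ¬ sep <+: (c :: rest))
    (h : pvCleanSplit sep rest = p :: ps) :
    pvCleanSplit sep (c :: rest) = (c :: p) :: ps := by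
  rw [pvCleanSplit]
  have hb : sep.isPrefixOf (c :: rest) = false := by
    rw [Bool.eq_false_iff]; intro hc; exact hp (List.isPrefixOf_iff_prefix.mp hc)
  simp only [hs, dite_eq_ite, hb, Bool.false_eq_true, if_false, h]

theorem pvClean1_tag (rest : List Char) :
    pvCleanSplit pvSep1 ('<' :: 'p' :: '>' :: rest) = [] :: pvCleanSplit pvSep1 rest := by
  rw [pvCleanSplit]; simp [pvSep1, List.isPrefixOf]

theorem pvClean2_tag (rest : List Char) :
    pvCleanSplit pvSep2 ('<' :: '/' :: 'p' :: '>' :: rest) = [] :: pvCleanSplit pvSep2 rest := by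
  rw [pvCleanSplit]; simp [pvSep2, List.isPrefixOf]

theorem pvClean_nil (sep : List Char) (hs : sep ≠ []) : pvCleanSplit sep [] = [[]] := by
  rw [pvCleanSplit]; simp [hs]

theorem pvSep1_not_prefix (c : Char) (rest : List Char)
    (h : ∀ r, c = '<' → rest = 'p' :: '>' :: r → False) : ¬ pvSep1 <+: (c :: rest) := by
  rintro ⟨t, ht⟩
  simp only [pvSep1] at ht
  cases ht
  exact h t rfl rfl

theorem pvSep2_not_prefix (c : Char) (rest : List Char)
    (h : ∀ r, c = '<' → rest = '/' :: 'p' :: '>' :: r → False) : ¬ pvSep2 <+: (c :: rest) := by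
  rintro ⟨t, ht⟩
  simp only [pvSep2] at ht
  cases ht
  exact h t rfl rfl

-- the central fact: B's one-pass scanner computes A's nested split, flattened
theorem pvKey (buf cs : List Char) :
    pvSplitTags buf cs = pvMapHd buf.reverse (pvF cs) := by
  fun_induction pvSplitTags buf cs with
  | case1 buf rest ih =>
    obtain ⟨q, qs, hq⟩ : ∃ q qs, pvF rest = q :: qs := by
      obtain ⟨p, ps, h1, _⟩ := pvCleanSplit_head pvSep1 rest
      obtain ⟨q, qs, h2, _⟩ := pvCleanSplit_head pvSep2 p
      exact ⟨q, qs ++ ps.flatMap (pvCleanSplit pvSep2), by simp [pvF, h1, h2]⟩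
    rw [ih, hq]
    simp only [pvF, pvClean1_tag, List.flatMap_cons, pvClean_nil pvSep2 (by simp [pvSep2])]
    rw [show (pvCleanSplit pvSep1 rest).flatMap (pvCleanSplit pvSep2) = pvF rest from rfl, hq]
    simp [pvMapHd]
  | case2 buf rest ih =>
    obtain ⟨p, ps, h1, _⟩ := pvCleanSplit_head pvSep1 rest
    have h4 : pvCleanSplit pvSep1 ('<' :: '/' :: 'p' :: '>' :: rest)
        = ('<' :: '/' :: 'p' :: '>' :: p) :: ps := by
      have e1 := pvClean_cons pvSep1 '>' rest p ps (by simp [pvSep1])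
        (by rintro ⟨t, ht⟩; simp [pvSep1] at ht) h1
      have e2 := pvClean_cons pvSep1 'p' _ _ ps (by simp [pvSep1])
        (by rintro ⟨t, ht⟩; simp [pvSep1] at ht) e1
      have e3 := pvClean_cons pvSep1 '/' _ _ ps (by simp [pvSep1])
        (by rintro ⟨t, ht⟩; simp [pvSep1] at ht) e2
      exact pvClean_cons pvSep1 '<' _ _ ps (by simp [pvSep1])
        (by rintro ⟨t, ht⟩; simp [pvSep1] at ht) e3
    obtain ⟨q, qs, hq⟩ : ∃ q qs, pvF rest = q :: qs := by
      obtain ⟨q, qs, h2, _⟩ := pvCleanSplit_head pvSep2 p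
      exact ⟨q, qs ++ ps.flatMap (pvCleanSplit pvSep2), by simp [pvF, h1, h2]⟩
    rw [ih, hq]
    simp only [pvF, h4, List.flatMap_cons, pvClean2_tag]
    have : pvCleanSplit pvSep2 p ++ (ps.flatMap (pvCleanSplit pvSep2)) = pvF rest := by
      simp [pvF, h1]
    simp only [List.cons_append]
    rw [this, hq]
    simp [pvMapHd]
  | case3 buf c rest x1 x2 ih =>
    obtain ⟨p, ps, h1, hpre⟩ := pvCleanSplit_head pvSep1 rest
    obtain ⟨q, qs, h2, _⟩ := pvCleanSplit_head pvSep2 p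
    have hnp1 : ¬ pvSep1 <+: (c :: rest) := pvSep1_not_prefix c rest x1
    have hnp2 : ¬ pvSep2 <+: (c :: rest) := pvSep2_not_prefix c rest x2
    have hc1 : pvCleanSplit pvSep1 (c :: rest) = (c :: p) :: ps :=
      pvClean_cons pvSep1 c rest p ps (by simp [pvSep1]) hnp1 h1
    have hnp2' : ¬ pvSep2 <+: (c :: p) := fun hpp =>
      hnp2 (hpp.trans (List.cons_prefix_cons.mpr ⟨rfl, hpre⟩))
    have hc2 : pvCleanSplit pvSep2 (c :: p) = (c :: q) :: qs :=
      pvClean_cons pvSep2 c p q qs (by simp [pvSep2]) hnp2' h2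
    rw [ih]
    have hFrest : pvF rest = q :: (qs ++ ps.flatMap (pvCleanSplit pvSep2)) := by
      simp [pvF, h1, h2]
    have hFcons : pvF (c :: rest) = (c :: q) :: (qs ++ ps.flatMap (pvCleanSplit pvSep2)) := by
      simp [pvF, hc1, hc2]
    rw [hFrest, hFcons]
    simp [pvMapHd]
  | case4 buf =>
    simp [pvF, pvClean_nil pvSep1 (by simp [pvSep1]), pvClean_nil pvSep2 (by simp [pvSep2]), pvMapHd]

theorem pvTags_eq_F (cs : List Char) : pvSplitTags [] cs = pvF cs := by
  rw [pvKey]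
  obtain ⟨p, ps, h1, _⟩ := pvCleanSplit_head pvSep1 cs
  obtain ⟨q, qs, h2, _⟩ := pvCleanSplit_head pvSep2 p
  have : pvF cs = q :: (qs ++ ps.flatMap (pvCleanSplit pvSep2)) := by simp [pvF, h1, h2]
  rw [this]
  simp [pvMapHd]

-- A's inner append loop is a filter
theorem pvInner (lst : List String) (para : List String) :
    lst.foldl (fun para2 t => if PySem.Str.strip t ≠ "" then para2 ++ [t] else para2) para
      = para ++ lst.filter (fun t => decide (PySem.Str.strip t ≠ "")) := by
  have h := PySem.List.foldl_append_if (fun t => decide (PySem.Str.strip t ≠ "")) id lst para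
  simpa using h

-- A's outer loop is a flatMap (the '' guard is redundant: the empty piece filters to nothing)
theorem pvOuter (pieces : List String) (para : List String) :
    pieces.foldl (fun para piece =>
      if piece ≠ "" then
        ((PySem.Chars.splitOn piece.toList "</p>".toList).map String.ofList).foldl
          (fun para2 t => if PySem.Str.strip t ≠ "" then para2 ++ [t] else para2) para
      else para) para
    = para ++ pieces.flatMap (fun piece =>
        ((PySem.Chars.splitOn piece.toList "</p>".toList).map String.ofList).filter
          (fun t => decide (PySem.Str.strip t ≠ ""))) := by
  induction pieces generalizing para with
  | nil => simp
  | cons piece rest ih =>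
    simp only [List.foldl_cons, List.flatMap_cons]
    by_cases hp : piece = ""
    · subst hp
      have hempty : (((PySem.Chars.splitOn "".toList "</p>".toList).map String.ofList).filter
          (fun t => decide (PySem.Str.strip t ≠ ""))) = [] := by decide
      rw [if_neg (by simp), ih, hempty]
      simp
    · rw [if_pos hp, pvInner, ih]
      simp only [List.append_assoc]

theorem pvFilter_ofList (csq : List Char) :
    decide (PySem.Str.strip (String.ofList csq) ≠ "") = decide (PySem.Chars.strip csq ≠ []) := by
  apply decide_eq_decide.mpr
  rw [not_iff_not, ← String.toList_eq_nil_iff, PySem.Str.toList_strip, String.toList_ofList]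

-- ===== VERDICT (by name: the statement is the Claim_ definition above) =====
theorem split_into_paragraphs_spec : Claim_equal_split_into_paragraphs := by
  intro data _
  unfold Spec_split_into_paragraphs split_into_paragraphs split_into_paragraphs_alt
  simp only []
  rw [pvOuter, List.nil_append]
  have hsep1 : "<p>".toList = pvSep1 := by decide
  have hsep2 : "</p>".toList = pvSep2 := by decide
  have e2 : ∀ l, PySem.Chars.splitOn l pvSep2 = pvCleanSplit pvSep2 l :=
    fun l => pvSplitOn_eq pvSep2 l (by simp [pvSep2])
  simp only [hsep1, hsep2, List.flatMap_map, List.filter_map, Function.comp_def,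
    String.toList_ofList, pvFilter_ofList, e2,
    pvSplitOn_eq pvSep1 data.toList (by simp [pvSep1])]
  rw [← List.map_flatMap, ← List.filter_flatMap]
  rw [show (pvCleanSplit pvSep1 data.toList).flatMap (pvCleanSplit pvSep2) = pvF data.toList from rfl]
  rw [← pvTags_eq_F]
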